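-- pv_equiv track=rewrite | github.com/allenai/allennlp | allennlp/service/predictors/semantic_role_labeler.py | make_srl_string
-- ===== SOURCE A (Python) =====
-- from typing import List, Tuple
--
-- def make_srl_string(words: List[str], tags: List[str]) -> str:
--     frame = []
--     chunk = []
--
--     for (token, tag) in zip(words, tags):
--         if tag.startswith("I-"):
--             chunk.append(token)
--         else:
--             if chunk:
--                 frame.append("[" + " ".join(chunk) + "]")
--                 chunk = []
--
--             if tag.startswith("B-"):
--                 chunk.append(tag[2:] + ": " + token)
--             elif tag == "O":
--                 frame.append(token)
--
--     if chunk: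
--         frame.append("[" + " ".join(chunk) + "]")
--
--     return " ".join(frame)
-- ===== SOURCE B (Python) =====
-- def make_srl_string(words, tags):
--     pairs = list(zip(words, tags))
--     pieces = []
--     i = 0
--     n = len(pairs)
--     while i < n:
--         tok, tag = pairs[i]
--         if tag.startswith("B-") or tag.startswith("I-"):
--             j = i + 1
--             while j < n and pairs[j][1].startswith("I-"):
--                 j += 1
--             tokens = " ".join(t for t, _ in pairs[i:j])
--             if tag.startswith("B-"):
--                 pieces.append("[" + tag[2:] + ": " + tokens + "]")
--             else:
--                 pieces.append("[" + tokens + "]")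
--             i = j
--         else:
--             if tag == "O":
--                 pieces.append(tok)
--             i += 1
--     return " ".join(pieces)
-- ===== Notes on version B (the rewrite author's own statement) =====
-- stated objective: simpler
-- what changed: A runs a frame/chunk accumulator state machine over every (token, tag) pair with flush logic in three places; B instead scans for each maximal B-/I- chunk boundary (two-pointer takeWhile over the following I- tags) and formats each chunk as one piece directly.
import Mathlib
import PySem

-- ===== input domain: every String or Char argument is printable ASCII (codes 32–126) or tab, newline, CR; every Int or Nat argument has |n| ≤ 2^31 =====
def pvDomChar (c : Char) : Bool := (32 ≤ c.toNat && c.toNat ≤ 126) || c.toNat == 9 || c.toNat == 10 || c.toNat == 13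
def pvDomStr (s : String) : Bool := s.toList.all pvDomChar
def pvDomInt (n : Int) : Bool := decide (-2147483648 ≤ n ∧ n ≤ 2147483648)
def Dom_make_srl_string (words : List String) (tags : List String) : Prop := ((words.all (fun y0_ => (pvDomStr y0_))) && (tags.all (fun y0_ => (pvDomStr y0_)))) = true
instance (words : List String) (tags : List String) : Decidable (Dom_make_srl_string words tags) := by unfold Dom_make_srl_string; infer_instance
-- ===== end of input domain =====

-- B replaces A's frame/chunk accumulator state machine by chunk-boundary scanning
-- (find each maximal B-/I- run, format it as one piece); objective: simpler, not faster.

-- ===== PORT A =====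
-- A's loop body: state is (frame, chunk); one step per (token, tag) pair.
def srlStep (st : List String × List String) (p : String × String) : List String × List String :=
  if PySem.Str.startswith p.2 "I-" then
    (st.1, st.2 ++ [p.1])
  else
    let frame := if st.2.isEmpty then st.1 else st.1 ++ ["[" ++ PySem.Str.join " " st.2 ++ "]"]
    if PySem.Str.startswith p.2 "B-" then
      (frame, [PySem.Str.slice p.2 (some 2) none ++ ": " ++ p.1])
    else if p.2 == "O" then
      (frame ++ [p.1], [])
    else
      (frame, [])

-- A's trailing 'if chunk: frame.append(...)'
def srlFinish (st : List String × List String) : List String :=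
  if st.2.isEmpty then st.1 else st.1 ++ ["[" ++ PySem.Str.join " " st.2 ++ "]"]

def make_srl_string (words : List String) (tags : List String) : String :=
  PySem.Str.join " " (srlFinish ((words.zip tags).foldl srlStep ([], [])))

-- ===== PORT B =====
-- Source B's outer while: at a B-/I- tag, the inner while j-scan is the takeWhile over the rest;
-- pairs[i:j] is (tok,tag) :: run, and the loop resumes at j, i.e. on the dropWhile.
def altPieces : List (String × String) → List String
  | [] => []
  | (tok, tag) :: rest =>
    if PySem.Str.startswith tag "B-" || PySem.Str.startswith tag "I-" then
      let run := rest.takeWhile (fun p => PySem.Str.startswith p.2 "I-")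
      let tokens := PySem.Str.join " " (((tok, tag) :: run).map Prod.fst)
      let piece := if PySem.Str.startswith tag "B-" then
          "[" ++ PySem.Str.slice tag (some 2) none ++ ": " ++ tokens ++ "]"
        else
          "[" ++ tokens ++ "]"
      piece :: altPieces (rest.dropWhile (fun p => PySem.Str.startswith p.2 "I-"))
    else if tag == "O" then
      tok :: altPieces rest
    else
      altPieces rest
termination_by ps => ps.length
decreasing_by
  · exact Nat.lt_succ_of_le (List.length_dropWhile_le _ _)
  · simp
  · simp

def make_srl_string_alt (words : List String) (tags : List String) : String :=
  PySem.Str.join " " (altPieces (words.zip tags))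

-- ===== PRECONDITION & SPEC =====
def Spec_make_srl_string (words : List String) (tags : List String) (out : String) : Prop := out = make_srl_string_alt words tags
instance (words : List String) (tags : List String) (out : String) : Decidable (Spec_make_srl_string words tags out) := by unfold Spec_make_srl_string; infer_instance

-- ===== CLAIM (what is proved, stated in full; the proofs are below) =====
def Claim_equal_make_srl_string : Prop := ∀ (words : List String) (tags : List String), Dom_make_srl_string words tags → Spec_make_srl_string words tags (make_srl_string words tags)

-- ===== LEMMAS AND PROOFS =====

-- A tag that starts with "B-" does not start with "I-".
lemma not_I_of_B {t : String} (h : PySem.Str.startswith t "B-" = true) :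
    PySem.Str.startswith t "I-" = false := by
  rcases (PySem.Chars.startswith_iff _ _).1 (by simpa using h) with ⟨l, hl⟩
  cases hI : PySem.Str.startswith t "I-" with
  | false => rfl
  | true =>
    rcases (PySem.Chars.startswith_iff _ _).1 (by simpa using hI) with ⟨m, hm⟩
    rw [← hl] at hm
    simp at hm

-- Str.join over a cons whose head is itself a concatenation.
lemma join_cons_append (sep a b : String) (L : List String) :
    PySem.Str.join sep ((a ++ b) :: L) = a ++ PySem.Str.join sep (b :: L) := by
  cases L with
  | nil => simp [PySem.Str.join, PySem.Chars.join_singleton]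
  | cons c L' => simp [PySem.Str.join, PySem.Chars.join_cons_cons, String.ofList_append]

-- Feeding a run of "I-" pairs into A's loop only appends their tokens to the chunk.
lemma foldl_run (run : List (String × String))
    (hrun : ∀ p ∈ run, PySem.Str.startswith p.2 "I-" = true) :
    ∀ (ps : List (String × String)) (frame chunk : List String),
      (run ++ ps).foldl srlStep (frame, chunk)
        = ps.foldl srlStep (frame, chunk ++ run.map Prod.fst) := by
  induction run with
  | nil => intro ps frame chunk; simp
  | cons q qs ih =>
    intro ps frame chunk
    have hq : PySem.Str.startswith q.2 "I-" = true := hrun q (by simp)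
    simp only [List.cons_append, List.foldl_cons, srlStep, hq, if_pos]
    rw [ih (fun p hp => hrun p (by simp [hp])) ps frame (chunk ++ [q.1])]
    simp

-- On a non-"I-" pair, a nonempty chunk may be flushed into the frame first.
lemma step_flush (q : String × String) (hq : PySem.Str.startswith q.2 "I-" = false)
    (frame chunk : List String) (hc : chunk.isEmpty = false) :
    srlStep (frame, chunk) q
      = srlStep (frame ++ ["[" ++ PySem.Str.join " " chunk ++ "]"], []) q := by
  simp only [srlStep, hq, Bool.false_eq_true, if_false, hc,
    List.isEmpty_nil, if_true]

-- Main invariant: from an empty chunk, A's remaining loop produces exactly B's pieces.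
lemma loop_eq_pieces : ∀ (ps : List (String × String)) (frame : List String),
    srlFinish (ps.foldl srlStep (frame, [])) = frame ++ altPieces ps := by
  intro ps
  induction ps using altPieces.induct with
  | case1 => intro frame; simp [srlFinish, altPieces]
  | case2 tok tag rest hBI ih =>
    intro frame
    have hsplit : rest = rest.takeWhile (fun p => PySem.Str.startswith p.2 "I-")
        ++ rest.dropWhile (fun p => PySem.Str.startswith p.2 "I-") :=
      (List.takeWhile_append_dropWhile).symm
    have hrun : ∀ p ∈ rest.takeWhile (fun q => PySem.Str.startswith q.2 "I-"),
        PySem.Str.startswith p.2 "I-" = true := fun p hp =>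
      List.mem_takeWhile_imp (p := fun q : String × String => PySem.Str.startswith q.2 "I-") hp
    -- after the head step the chunk is `first`; the I- run extends it, then it is flushed
    have finish : ∀ first : String,
        srlFinish ((rest.dropWhile (fun p => PySem.Str.startswith p.2 "I-")).foldl srlStep
            (frame, first :: (rest.takeWhile (fun p => PySem.Str.startswith p.2 "I-")).map Prod.fst))
          = frame ++ ("[" ++ PySem.Str.join " "
              (first :: (rest.takeWhile (fun p => PySem.Str.startswith p.2 "I-")).map Prod.fst) ++ "]")
              :: altPieces (rest.dropWhile (fun p => PySem.Str.startswith p.2 "I-")) := by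
      intro first
      cases hdrop : rest.dropWhile (fun p => PySem.Str.startswith p.2 "I-") with
      | nil =>
        simp [srlFinish, altPieces]
      | cons q qs =>
        have hne : rest.dropWhile (fun p => PySem.Str.startswith p.2 "I-") ≠ [] := by
          rw [hdrop]; simp
        have hqI : PySem.Str.startswith q.2 "I-" = false := by
          have aux : ∀ (l : List (String × String)),
              l.dropWhile (fun p => PySem.Str.startswith p.2 "I-") = q :: qs →
              PySem.Str.startswith q.2 "I-" = false := by
            intro l
            induction l with
            | nil => intro h; simp at h
            | cons r rs ih2 =>
              intro h
              by_cases hr : PySem.Str.startswith r.2 "I-" = true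
              · rw [List.dropWhile_cons_of_pos (by simpa using hr)] at h
                exact ih2 h
              · rw [List.dropWhile_cons_of_neg (by simpa using hr)] at h
                cases h
                simpa using hr
          exact aux rest hdrop
        rw [List.foldl_cons, step_flush q hqI _ _ (by simp), ← List.foldl_cons, ← hdrop,
          ih]
        simp
    have hfold : ∀ first : String, rest.foldl srlStep (frame, [first])
        = (rest.dropWhile (fun p => PySem.Str.startswith p.2 "I-")).foldl srlStep
            (frame, first :: (rest.takeWhile (fun p => PySem.Str.startswith p.2 "I-")).map Prod.fst) := by
      intro first
      conv_lhs => rw [hsplit]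
      rw [foldl_run _ hrun]
      simp
    by_cases hB : PySem.Str.startswith tag "B-" = true
    · have hI : PySem.Str.startswith tag "I-" = false := not_I_of_B hB
      have hB' : PySem.Chars.startswith tag.toList ['B', '-'] = true := by simpa using hB
      have hI' : PySem.Chars.startswith tag.toList ['I', '-'] = false := by simpa using hI
      have hstep : srlStep (frame, []) (tok, tag)
          = (frame, [PySem.Str.slice tag (some 2) none ++ ": " ++ tok]) := by
        simp [srlStep, hI', hB']
      rw [List.foldl_cons, hstep, hfold, finish]
      conv_rhs => rw [altPieces]
      simp only [if_pos, hB, List.map_cons]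
      rw [join_cons_append " " (PySem.Str.slice tag (some 2) none ++ ": ") tok]
      simp [String.append_assoc]
    · have hI : PySem.Str.startswith tag "I-" = true := by
        rcases Bool.or_eq_true_iff.1 hBI with h | h
        · exact absurd h hB
        · exact h
      have hI' : PySem.Chars.startswith tag.toList ['I', '-'] = true := by simpa using hI
      have hB' : PySem.Chars.startswith tag.toList ['B', '-'] = false := by simpa using hB
      have hstep : srlStep (frame, []) (tok, tag) = (frame, [tok]) := by
        simp [srlStep, hI']
      rw [List.foldl_cons, hstep, hfold, finish]
      conv_rhs => rw [altPieces]
      simp only [hBI, if_pos, List.map_cons]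
      simp [hB']
  | case3 tok tag rest hBI hO ih =>
    intro frame
    have hnot := hBI
    simp only [Bool.or_eq_true, not_or, Bool.not_eq_true] at hnot
    obtain ⟨hB, hI⟩ := hnot
    have hB' : PySem.Chars.startswith tag.toList ['B', '-'] = false := by simpa using hB
    have hI' : PySem.Chars.startswith tag.toList ['I', '-'] = false := by simpa using hI
    have hstep : srlStep (frame, []) (tok, tag) = (frame ++ [tok], []) := by
      simp [srlStep, hI', hB', hO]
    rw [List.foldl_cons, hstep, ih]
    conv_rhs => rw [altPieces]
    simp [hB', hI', hO]
  | case4 tok tag rest hBI hO ih =>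
    intro frame
    have hnot := hBI
    simp only [Bool.or_eq_true, not_or, Bool.not_eq_true] at hnot
    obtain ⟨hB, hI⟩ := hnot
    have hB' : PySem.Chars.startswith tag.toList ['B', '-'] = false := by simpa using hB
    have hI' : PySem.Chars.startswith tag.toList ['I', '-'] = false := by simpa using hI
    have hO' : ¬ tag = "O" := by simpa using hO
    have hstep : srlStep (frame, []) (tok, tag) = (frame, []) := by
      simp [srlStep, hI', hB', hO']
    rw [List.foldl_cons, hstep, ih]
    conv_rhs => rw [altPieces]
    simp [hB', hI', hO']

-- ===== VERDICT (by name: the statement is the Claim_ definition above) =====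
theorem make_srl_string_spec : Claim_equal_make_srl_string := by
  intro words tags _
  unfold Spec_make_srl_string make_srl_string make_srl_string_alt
  rw [loop_eq_pieces]
  simp
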